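-- pv_equiv track=rewrite | github.com/mikehung/leetcode | 10.Regular_Expression_Matching.py | real_pattern
-- ===== SOURCE A (Python) =====
-- def real_pattern(p):
--     index = 0
--     real_pattern_list = []
--     prev_glob_char = None
--
--     while index < len(p):
--         if index+1 < len(p) and p[index+1] == '*':
--             if prev_glob_char != p[index]:
--                 prev_glob_char = p[index]
--                 real_pattern_list.append(p[index:index+2])
--             index += 2
--         else:
--             prev_glob_char = None
--             real_pattern_list.append(p[index])
--             index += 1
--
--     return ''.join(real_pattern_list)
-- ===== SOURCE B (Python) =====
-- def real_pattern(p):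
--     # pass 1: tokenize into star two-char tokens and single-char tokens
--     tokens = []
--     i = 0
--     while i < len(p):
--         if i + 1 < len(p) and p[i + 1] == '*':
--             tokens.append(p[i:i + 2])
--             i += 2
--         else:
--             tokens.append(p[i])
--             i += 1
--     # pass 2: drop a star token equal to the star token kept just before it
--     out = []
--     last_star = None
--     for t in tokens:
--         if len(t) == 2:
--             if t != last_star:
--                 out.append(t)
--             last_star = t
--         else:
--             out.append(t)
--             last_star = None
--     return ''.join(out)
-- ===== Notes on version B (the rewrite author's own statement) =====
-- stated objective: alternative
-- what changed: Single interleaved while-loop carrying a prev-glob register replaced by a two-pass pipeline: tokenize into star two-char tokens and single-char tokens, then a separate fold that drops a star token equal to the previously kept star token.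
import Mathlib
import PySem

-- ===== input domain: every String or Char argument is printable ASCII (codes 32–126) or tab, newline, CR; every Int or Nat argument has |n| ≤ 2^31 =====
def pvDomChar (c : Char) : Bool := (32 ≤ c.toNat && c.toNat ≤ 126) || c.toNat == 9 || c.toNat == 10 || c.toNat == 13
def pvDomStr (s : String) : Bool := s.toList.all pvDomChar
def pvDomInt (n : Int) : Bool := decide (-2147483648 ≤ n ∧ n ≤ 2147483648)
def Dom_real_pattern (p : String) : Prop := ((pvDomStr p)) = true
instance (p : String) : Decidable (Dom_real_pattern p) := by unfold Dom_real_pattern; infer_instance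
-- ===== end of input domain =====

-- ===== PORT A =====
-- B differs from A by decomposition: A collapses while scanning; B tokenizes then collapses.
-- A's while loop: index-based scan emitting tokens while tracking the previous glob char.
def realLoop : List Char → Option Char → List String
  | [], _ => []
  | [c], _ => [String.ofList [c]]
  | c :: d :: rest, prev =>
    if d = '*' then
      (if prev ≠ some c then [String.ofList [c, d]] else []) ++ realLoop rest (some c)
    else
      String.ofList [c] :: realLoop (d :: rest) none

def real_pattern (p : String) : String :=
  PySem.Str.join "" (realLoop p.toList none)

-- ===== PORT B =====
-- pass 1 of Source B: split the pattern into star two-char tokens and single-char tokens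
def tokenizeB : List Char → List String
  | [] => []
  | [c] => [String.ofList [c]]
  | c :: d :: rest =>
    if d = '*' then String.ofList [c, d] :: tokenizeB rest
    else String.ofList [c] :: tokenizeB (d :: rest)

-- pass 2 of Source B: fold dropping a star token equal to the star token kept just before it
def collapseB : List String → Option String → List String
  | [], _ => []
  | t :: ts, lastStar =>
    if PySem.Str.len t = 2 then
      (if some t ≠ lastStar then [t] else []) ++ collapseB ts (some t)
    else
      t :: collapseB ts none

def real_pattern_alt (p : String) : String :=
  PySem.Str.join "" (collapseB (tokenizeB p.toList) none)

-- ===== PRECONDITION & SPEC =====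
def Spec_real_pattern (p : String) (out : String) : Prop := out = real_pattern_alt p
instance (p : String) (out : String) : Decidable (Spec_real_pattern p out) := by
  unfold Spec_real_pattern; infer_instance

-- ===== CLAIM (what is proved, stated in full; the proofs are below) =====
def Claim_equal_real_pattern : Prop := ∀ (p : String), Dom_real_pattern p → Spec_real_pattern p (real_pattern p)

-- ===== LEMMAS AND PROOFS =====
theorem realLoop_eq_collapse_tokenize (cs : List Char) (prev : Option Char) :
    realLoop cs prev = collapseB (tokenizeB cs) (prev.map (fun c => String.ofList [c, '*'])) := by
  induction cs, prev using realLoop.induct with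
  | case1 => simp [realLoop, tokenizeB, collapseB]
  | case2 c prev => simp [realLoop, tokenizeB, collapseB, PySem.Str.len]
  | case3 c rest prev ih =>
    simp only [realLoop, tokenizeB, ih]
    cases prev with
    | none => simp [collapseB, PySem.Str.len]
    | some c' =>
      by_cases h : c' = c
      · subst h; simp [collapseB, PySem.Str.len]
      · simp [collapseB, PySem.Str.len, String.ofList_inj, h, Ne.symm h]
  | case4 c d rest prev hd ih =>
    simp [realLoop, tokenizeB, collapseB, if_neg hd, ih, PySem.Str.len]

-- ===== VERDICT (by name: the statement is the Claim_ definition above) =====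
theorem real_pattern_spec : Claim_equal_real_pattern := by
  intro p _
  unfold Spec_real_pattern real_pattern real_pattern_alt
  rw [realLoop_eq_collapse_tokenize]
  rfl
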